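-- pv_equiv track=rewrite | github.com/david-constantinescu/ctf-helper | scripts/pyc_src_decompiler.py | get_python_version_from_magic
-- ===== SOURCE A (Python) =====
-- def get_python_version_from_magic(magic_int):
--     # Partial mapping of magic numbers to Python versions
--     magic_map = {
--         20121: '1.5', 50428: '1.6', 50823: '2.0',
--         60202: '2.1', 60717: '2.2', 62011: '2.3',
--         62021: '2.4', 62131: '2.5', 62161: '2.6',
--         62211: '2.7',
--         3000: '3.0', 3150: '3.1', 3180: '3.2',
--         3230: '3.3', 3310: '3.4', 3350: '3.5',
--         3379: '3.6', 3394: '3.7', 3413: '3.8',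
--         3425: '3.9', 3439: '3.10', 3495: '3.11',
--         3550: '3.12', 3571: '3.13'
--     }
--     # Values are approximate base magic numbers.
--     # Python 3 uses ranges sometimes, but this is a best effort.
--     for k, v in sorted(magic_map.items(), reverse=True):
--         if magic_int >= k:
--             return v
--     return "Unknown"
-- ===== SOURCE B (Python) =====
-- def get_python_version_from_magic(magic_int):
--     # Binary search over the ascending key list for the largest key <= magic_int.
--     keys = [3000, 3150, 3180, 3230, 3310, 3350, 3379, 3394, 3413, 3425,
--             3439, 3495, 3550, 3571, 20121, 50428, 50823, 60202, 60717,
--             62011, 62021, 62131, 62161, 62211]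
--     vers = ['3.0', '3.1', '3.2', '3.3', '3.4', '3.5', '3.6', '3.7', '3.8',
--             '3.9', '3.10', '3.11', '3.12', '3.13', '1.5', '1.6', '2.0',
--             '2.1', '2.2', '2.3', '2.4', '2.5', '2.6', '2.7']
--     lo, hi = 0, len(keys)
--     while lo < hi:
--         mid = (lo + hi) // 2
--         if magic_int < keys[mid]:
--             hi = mid
--         else:
--             lo = mid + 1
--     return "Unknown" if lo == 0 else vers[lo - 1]
-- ===== Notes on version B (the rewrite author's own statement) =====
-- stated objective: idiomatic
-- what changed: Replaces the descending linear scan over the sorted magic table with a bisect_right-style binary search over the ascending key list, returning the version at the insertion point minus one (or 'Unknown' below the smallest key).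
import Mathlib
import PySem

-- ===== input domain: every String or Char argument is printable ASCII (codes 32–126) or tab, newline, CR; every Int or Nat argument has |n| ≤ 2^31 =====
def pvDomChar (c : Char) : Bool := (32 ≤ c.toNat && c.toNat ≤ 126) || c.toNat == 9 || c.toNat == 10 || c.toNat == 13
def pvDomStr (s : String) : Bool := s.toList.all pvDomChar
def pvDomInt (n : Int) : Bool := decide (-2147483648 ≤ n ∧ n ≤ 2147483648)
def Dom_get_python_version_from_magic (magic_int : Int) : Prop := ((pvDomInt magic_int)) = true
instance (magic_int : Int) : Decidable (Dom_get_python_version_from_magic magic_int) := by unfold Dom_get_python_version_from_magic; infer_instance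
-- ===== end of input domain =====

-- B replaces A's descending linear scan of the magic table with a binary search
-- (bisect_right) over the ascending key list: idiomatic threshold lookup, same results.


-- ===== PORT A =====
-- sorted(magic_map.items(), reverse=True): the table's pairs in descending key order
def pvMagicDesc : List (Int × String) :=
  [(62211, "2.7"), (62161, "2.6"), (62131, "2.5"), (62021, "2.4"),
   (62011, "2.3"), (60717, "2.2"), (60202, "2.1"), (50823, "2.0"),
   (50428, "1.6"), (20121, "1.5"), (3571, "3.13"), (3550, "3.12"),
   (3495, "3.11"), (3439, "3.10"), (3425, "3.9"), (3413, "3.8"),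
   (3394, "3.7"), (3379, "3.6"), (3350, "3.5"), (3310, "3.4"),
   (3230, "3.3"), (3180, "3.2"), (3150, "3.1"), (3000, "3.0")]

-- the for-loop with early return
def pvScanDesc (magic_int : Int) : List (Int × String) → String
  | [] => "Unknown"
  | (k, v) :: rest => if magic_int ≥ k then v else pvScanDesc magic_int rest

def get_python_version_from_magic (magic_int : Int) : String :=
  pvScanDesc magic_int pvMagicDesc

-- ===== PORT B =====
def pvKeys : List Int :=
  [3000, 3150, 3180, 3230, 3310, 3350, 3379, 3394, 3413, 3425,
   3439, 3495, 3550, 3571, 20121, 50428, 50823, 60202, 60717,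
   62011, 62021, 62131, 62161, 62211]

def pvVers : List String :=
  ["3.0", "3.1", "3.2", "3.3", "3.4", "3.5", "3.6", "3.7", "3.8",
   "3.9", "3.10", "3.11", "3.12", "3.13", "1.5", "1.6", "2.0",
   "2.1", "2.2", "2.3", "2.4", "2.5", "2.6", "2.7"]

-- the while-loop of Source B's binary search; fuel only makes the loop structurally total
def pvBisect (magic_int : Int) : Nat → Nat → Nat → Nat
  | 0, lo, _ => lo
  | fuel + 1, lo, hi =>
    if lo < hi then
      let mid := (lo + hi) / 2
      if magic_int < pvKeys.getD mid 0 then pvBisect magic_int fuel lo mid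
      else pvBisect magic_int fuel (mid + 1) hi
    else lo

def get_python_version_from_magic_alt (magic_int : Int) : String :=
  let lo := pvBisect magic_int 24 0 24
  if lo == 0 then "Unknown" else pvVers.getD (lo - 1) "Unknown"

-- ===== PRECONDITION & SPEC =====
def Spec_get_python_version_from_magic (magic_int : Int) (out : String) : Prop := out = get_python_version_from_magic_alt magic_int
instance (magic_int : Int) (out : String) : Decidable (Spec_get_python_version_from_magic magic_int out) := by unfold Spec_get_python_version_from_magic; infer_instance

-- ===== CLAIM (what is proved, stated in full; the proofs are below) =====
def Claim_equal_get_python_version_from_magic : Prop := ∀ (magic_int : Int), Dom_get_python_version_from_magic magic_int → Spec_get_python_version_from_magic magic_int (get_python_version_from_magic magic_int)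

-- ===== LEMMAS AND PROOFS =====

-- ===== VERDICT (by name: the statement is the Claim_ definition above) =====
set_option maxHeartbeats 1000000 in
theorem get_python_version_from_magic_spec : Claim_equal_get_python_version_from_magic := by
  intro m _
  unfold Spec_get_python_version_from_magic get_python_version_from_magic get_python_version_from_magic_alt
  by_cases h62211 : 62211 ≤ m
  · simp [pvScanDesc, pvMagicDesc, pvBisect, pvKeys, pvVers, (show m ≥ 62211 from h62211), (show ¬ m < 3550 by omega), (show ¬ m < 60717 by omega), (show ¬ m < 62131 by omega), (show ¬ m < 62211 by omega)]
  by_cases h62161 : 62161 ≤ m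
  · simp [pvScanDesc, pvMagicDesc, pvBisect, pvKeys, pvVers, (show ¬ m ≥ 62211 by omega), (show m ≥ 62161 from h62161), (show ¬ m < 3550 by omega), (show ¬ m < 60717 by omega), (show ¬ m < 62131 by omega), (show m < 62211 by omega), (show ¬ m < 62161 by omega)]
  by_cases h62131 : 62131 ≤ m
  · simp [pvScanDesc, pvMagicDesc, pvBisect, pvKeys, pvVers, (show ¬ m ≥ 62211 by omega), (show ¬ m ≥ 62161 by omega), (show m ≥ 62131 from h62131), (show ¬ m < 3550 by omega), (show ¬ m < 60717 by omega), (show ¬ m < 62131 by omega), (show m < 62211 by omega), (show m < 62161 by omega)]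
  by_cases h62021 : 62021 ≤ m
  · simp [pvScanDesc, pvMagicDesc, pvBisect, pvKeys, pvVers, (show ¬ m ≥ 62211 by omega), (show ¬ m ≥ 62161 by omega), (show ¬ m ≥ 62131 by omega), (show m ≥ 62021 from h62021), (show ¬ m < 3550 by omega), (show ¬ m < 60717 by omega), (show m < 62131 by omega), (show ¬ m < 62021 by omega)]
  by_cases h62011 : 62011 ≤ m
  · simp [pvScanDesc, pvMagicDesc, pvBisect, pvKeys, pvVers, (show ¬ m ≥ 62211 by omega), (show ¬ m ≥ 62161 by omega), (show ¬ m ≥ 62131 by omega), (show ¬ m ≥ 62021 by omega), (show m ≥ 62011 from h62011), (show ¬ m < 3550 by omega), (show ¬ m < 60717 by omega), (show m < 62131 by omega), (show m < 62021 by omega), (show ¬ m < 62011 by omega)]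
  by_cases h60717 : 60717 ≤ m
  · simp [pvScanDesc, pvMagicDesc, pvBisect, pvKeys, pvVers, (show ¬ m ≥ 62211 by omega), (show ¬ m ≥ 62161 by omega), (show ¬ m ≥ 62131 by omega), (show ¬ m ≥ 62021 by omega), (show ¬ m ≥ 62011 by omega), (show m ≥ 60717 from h60717), (show ¬ m < 3550 by omega), (show ¬ m < 60717 by omega), (show m < 62131 by omega), (show m < 62021 by omega), (show m < 62011 by omega)]
  by_cases h60202 : 60202 ≤ m
  · simp [pvScanDesc, pvMagicDesc, pvBisect, pvKeys, pvVers, (show ¬ m ≥ 62211 by omega), (show ¬ m ≥ 62161 by omega), (show ¬ m ≥ 62131 by omega), (show ¬ m ≥ 62021 by omega), (show ¬ m ≥ 62011 by omega), (show ¬ m ≥ 60717 by omega), (show m ≥ 60202 from h60202), (show ¬ m < 3550 by omega), (show m < 60717 by omega), (show ¬ m < 50428 by omega), (show ¬ m < 60202 by omega)]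
  by_cases h50823 : 50823 ≤ m
  · simp [pvScanDesc, pvMagicDesc, pvBisect, pvKeys, pvVers, (show ¬ m ≥ 62211 by omega), (show ¬ m ≥ 62161 by omega), (show ¬ m ≥ 62131 by omega), (show ¬ m ≥ 62021 by omega), (show ¬ m ≥ 62011 by omega), (show ¬ m ≥ 60717 by omega), (show ¬ m ≥ 60202 by omega), (show m ≥ 50823 from h50823), (show ¬ m < 3550 by omega), (show m < 60717 by omega), (show ¬ m < 50428 by omega), (show m < 60202 by omega), (show ¬ m < 50823 by omega)]
  by_cases h50428 : 50428 ≤ m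
  · simp [pvScanDesc, pvMagicDesc, pvBisect, pvKeys, pvVers, (show ¬ m ≥ 62211 by omega), (show ¬ m ≥ 62161 by omega), (show ¬ m ≥ 62131 by omega), (show ¬ m ≥ 62021 by omega), (show ¬ m ≥ 62011 by omega), (show ¬ m ≥ 60717 by omega), (show ¬ m ≥ 60202 by omega), (show ¬ m ≥ 50823 by omega), (show m ≥ 50428 from h50428), (show ¬ m < 3550 by omega), (show m < 60717 by omega), (show ¬ m < 50428 by omega), (show m < 60202 by omega), (show m < 50823 by omega)]
  by_cases h20121 : 20121 ≤ m
  · simp [pvScanDesc, pvMagicDesc, pvBisect, pvKeys, pvVers, (show ¬ m ≥ 62211 by omega), (show ¬ m ≥ 62161 by omega), (show ¬ m ≥ 62131 by omega), (show ¬ m ≥ 62021 by omega), (show ¬ m ≥ 62011 by omega), (show ¬ m ≥ 60717 by omega), (show ¬ m ≥ 60202 by omega), (show ¬ m ≥ 50823 by omega), (show ¬ m ≥ 50428 by omega), (show m ≥ 20121 from h20121), (show ¬ m < 3550 by omega), (show m < 60717 by omega), (show m < 50428 by omega), (show ¬ m < 20121 by omega)]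
  by_cases h3571 : 3571 ≤ m
  · simp [pvScanDesc, pvMagicDesc, pvBisect, pvKeys, pvVers, (show ¬ m ≥ 62211 by omega), (show ¬ m ≥ 62161 by omega), (show ¬ m ≥ 62131 by omega), (show ¬ m ≥ 62021 by omega), (show ¬ m ≥ 62011 by omega), (show ¬ m ≥ 60717 by omega), (show ¬ m ≥ 60202 by omega), (show ¬ m ≥ 50823 by omega), (show ¬ m ≥ 50428 by omega), (show ¬ m ≥ 20121 by omega), (show m ≥ 3571 from h3571), (show ¬ m < 3550 by omega), (show m < 60717 by omega), (show m < 50428 by omega), (show m < 20121 by omega), (show ¬ m < 3571 by omega)]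
  by_cases h3550 : 3550 ≤ m
  · simp [pvScanDesc, pvMagicDesc, pvBisect, pvKeys, pvVers, (show ¬ m ≥ 62211 by omega), (show ¬ m ≥ 62161 by omega), (show ¬ m ≥ 62131 by omega), (show ¬ m ≥ 62021 by omega), (show ¬ m ≥ 62011 by omega), (show ¬ m ≥ 60717 by omega), (show ¬ m ≥ 60202 by omega), (show ¬ m ≥ 50823 by omega), (show ¬ m ≥ 50428 by omega), (show ¬ m ≥ 20121 by omega), (show ¬ m ≥ 3571 by omega), (show m ≥ 3550 from h3550), (show ¬ m < 3550 by omega), (show m < 60717 by omega), (show m < 50428 by omega), (show m < 20121 by omega), (show m < 3571 by omega)]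
  by_cases h3495 : 3495 ≤ m
  · simp [pvScanDesc, pvMagicDesc, pvBisect, pvKeys, pvVers, (show ¬ m ≥ 62211 by omega), (show ¬ m ≥ 62161 by omega), (show ¬ m ≥ 62131 by omega), (show ¬ m ≥ 62021 by omega), (show ¬ m ≥ 62011 by omega), (show ¬ m ≥ 60717 by omega), (show ¬ m ≥ 60202 by omega), (show ¬ m ≥ 50823 by omega), (show ¬ m ≥ 50428 by omega), (show ¬ m ≥ 20121 by omega), (show ¬ m ≥ 3571 by omega), (show ¬ m ≥ 3550 by omega), (show m ≥ 3495 from h3495), (show m < 3550 by omega), (show ¬ m < 3379 by omega), (show ¬ m < 3425 by omega), (show ¬ m < 3495 by omega)]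
  by_cases h3439 : 3439 ≤ m
  · simp [pvScanDesc, pvMagicDesc, pvBisect, pvKeys, pvVers, (show ¬ m ≥ 62211 by omega), (show ¬ m ≥ 62161 by omega), (show ¬ m ≥ 62131 by omega), (show ¬ m ≥ 62021 by omega), (show ¬ m ≥ 62011 by omega), (show ¬ m ≥ 60717 by omega), (show ¬ m ≥ 60202 by omega), (show ¬ m ≥ 50823 by omega), (show ¬ m ≥ 50428 by omega), (show ¬ m ≥ 20121 by omega), (show ¬ m ≥ 3571 by omega), (show ¬ m ≥ 3550 by omega), (show ¬ m ≥ 3495 by omega), (show m ≥ 3439 from h3439), (show m < 3550 by omega), (show ¬ m < 3379 by omega), (show ¬ m < 3425 by omega), (show m < 3495 by omega), (show ¬ m < 3439 by omega)]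
  by_cases h3425 : 3425 ≤ m
  · simp [pvScanDesc, pvMagicDesc, pvBisect, pvKeys, pvVers, (show ¬ m ≥ 62211 by omega), (show ¬ m ≥ 62161 by omega), (show ¬ m ≥ 62131 by omega), (show ¬ m ≥ 62021 by omega), (show ¬ m ≥ 62011 by omega), (show ¬ m ≥ 60717 by omega), (show ¬ m ≥ 60202 by omega), (show ¬ m ≥ 50823 by omega), (show ¬ m ≥ 50428 by omega), (show ¬ m ≥ 20121 by omega), (show ¬ m ≥ 3571 by omega), (show ¬ m ≥ 3550 by omega), (show ¬ m ≥ 3495 by omega), (show ¬ m ≥ 3439 by omega), (show m ≥ 3425 from h3425), (show m < 3550 by omega), (show ¬ m < 3379 by omega), (show ¬ m < 3425 by omega), (show m < 3495 by omega), (show m < 3439 by omega)]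
  by_cases h3413 : 3413 ≤ m
  · simp [pvScanDesc, pvMagicDesc, pvBisect, pvKeys, pvVers, (show ¬ m ≥ 62211 by omega), (show ¬ m ≥ 62161 by omega), (show ¬ m ≥ 62131 by omega), (show ¬ m ≥ 62021 by omega), (show ¬ m ≥ 62011 by omega), (show ¬ m ≥ 60717 by omega), (show ¬ m ≥ 60202 by omega), (show ¬ m ≥ 50823 by omega), (show ¬ m ≥ 50428 by omega), (show ¬ m ≥ 20121 by omega), (show ¬ m ≥ 3571 by omega), (show ¬ m ≥ 3550 by omega), (show ¬ m ≥ 3495 by omega), (show ¬ m ≥ 3439 by omega), (show ¬ m ≥ 3425 by omega), (show m ≥ 3413 from h3413), (show m < 3550 by omega), (show ¬ m < 3379 by omega), (show m < 3425 by omega), (show ¬ m < 3413 by omega)]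
  by_cases h3394 : 3394 ≤ m
  · simp [pvScanDesc, pvMagicDesc, pvBisect, pvKeys, pvVers, (show ¬ m ≥ 62211 by omega), (show ¬ m ≥ 62161 by omega), (show ¬ m ≥ 62131 by omega), (show ¬ m ≥ 62021 by omega), (show ¬ m ≥ 62011 by omega), (show ¬ m ≥ 60717 by omega), (show ¬ m ≥ 60202 by omega), (show ¬ m ≥ 50823 by omega), (show ¬ m ≥ 50428 by omega), (show ¬ m ≥ 20121 by omega), (show ¬ m ≥ 3571 by omega), (show ¬ m ≥ 3550 by omega), (show ¬ m ≥ 3495 by omega), (show ¬ m ≥ 3439 by omega), (show ¬ m ≥ 3425 by omega), (show ¬ m ≥ 3413 by omega), (show m ≥ 3394 from h3394), (show m < 3550 by omega), (show ¬ m < 3379 by omega), (show m < 3425 by omega), (show m < 3413 by omega), (show ¬ m < 3394 by omega)]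
  by_cases h3379 : 3379 ≤ m
  · simp [pvScanDesc, pvMagicDesc, pvBisect, pvKeys, pvVers, (show ¬ m ≥ 62211 by omega), (show ¬ m ≥ 62161 by omega), (show ¬ m ≥ 62131 by omega), (show ¬ m ≥ 62021 by omega), (show ¬ m ≥ 62011 by omega), (show ¬ m ≥ 60717 by omega), (show ¬ m ≥ 60202 by omega), (show ¬ m ≥ 50823 by omega), (show ¬ m ≥ 50428 by omega), (show ¬ m ≥ 20121 by omega), (show ¬ m ≥ 3571 by omega), (show ¬ m ≥ 3550 by omega), (show ¬ m ≥ 3495 by omega), (show ¬ m ≥ 3439 by omega), (show ¬ m ≥ 3425 by omega), (show ¬ m ≥ 3413 by omega), (show ¬ m ≥ 3394 by omega), (show m ≥ 3379 from h3379), (show m < 3550 by omega), (show ¬ m < 3379 by omega), (show m < 3425 by omega), (show m < 3413 by omega), (show m < 3394 by omega)]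
  by_cases h3350 : 3350 ≤ m
  · simp [pvScanDesc, pvMagicDesc, pvBisect, pvKeys, pvVers, (show ¬ m ≥ 62211 by omega), (show ¬ m ≥ 62161 by omega), (show ¬ m ≥ 62131 by omega), (show ¬ m ≥ 62021 by omega), (show ¬ m ≥ 62011 by omega), (show ¬ m ≥ 60717 by omega), (show ¬ m ≥ 60202 by omega), (show ¬ m ≥ 50823 by omega), (show ¬ m ≥ 50428 by omega), (show ¬ m ≥ 20121 by omega), (show ¬ m ≥ 3571 by omega), (show ¬ m ≥ 3550 by omega), (show ¬ m ≥ 3495 by omega), (show ¬ m ≥ 3439 by omega), (show ¬ m ≥ 3425 by omega), (show ¬ m ≥ 3413 by omega), (show ¬ m ≥ 3394 by omega), (show ¬ m ≥ 3379 by omega), (show m ≥ 3350 from h3350), (show m < 3550 by omega), (show m < 3379 by omega), (show ¬ m < 3230 by omega), (show ¬ m < 3350 by omega)]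
  by_cases h3310 : 3310 ≤ m
  · simp [pvScanDesc, pvMagicDesc, pvBisect, pvKeys, pvVers, (show ¬ m ≥ 62211 by omega), (show ¬ m ≥ 62161 by omega), (show ¬ m ≥ 62131 by omega), (show ¬ m ≥ 62021 by omega), (show ¬ m ≥ 62011 by omega), (show ¬ m ≥ 60717 by omega), (show ¬ m ≥ 60202 by omega), (show ¬ m ≥ 50823 by omega), (show ¬ m ≥ 50428 by omega), (show ¬ m ≥ 20121 by omega), (show ¬ m ≥ 3571 by omega), (show ¬ m ≥ 3550 by omega), (show ¬ m ≥ 3495 by omega), (show ¬ m ≥ 3439 by omega), (show ¬ m ≥ 3425 by omega), (show ¬ m ≥ 3413 by omega), (show ¬ m ≥ 3394 by omega), (show ¬ m ≥ 3379 by omega), (show ¬ m ≥ 3350 by omega), (show m ≥ 3310 from h3310), (show m < 3550 by omega), (show m < 3379 by omega), (show ¬ m < 3230 by omega), (show m < 3350 by omega), (show ¬ m < 3310 by omega)]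
  by_cases h3230 : 3230 ≤ m
  · simp [pvScanDesc, pvMagicDesc, pvBisect, pvKeys, pvVers, (show ¬ m ≥ 62211 by omega), (show ¬ m ≥ 62161 by omega), (show ¬ m ≥ 62131 by omega), (show ¬ m ≥ 62021 by omega), (show ¬ m ≥ 62011 by omega), (show ¬ m ≥ 60717 by omega), (show ¬ m ≥ 60202 by omega), (show ¬ m ≥ 50823 by omega), (show ¬ m ≥ 50428 by omega), (show ¬ m ≥ 20121 by omega), (show ¬ m ≥ 3571 by omega), (show ¬ m ≥ 3550 by omega), (show ¬ m ≥ 3495 by omega), (show ¬ m ≥ 3439 by omega), (show ¬ m ≥ 3425 by omega), (show ¬ m ≥ 3413 by omega), (show ¬ m ≥ 3394 by omega), (show ¬ m ≥ 3379 by omega), (show ¬ m ≥ 3350 by omega), (show ¬ m ≥ 3310 by omega), (show m ≥ 3230 from h3230), (show m < 3550 by omega), (show m < 3379 by omega), (show ¬ m < 3230 by omega), (show m < 3350 by omega), (show m < 3310 by omega)]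
  by_cases h3180 : 3180 ≤ m
  · simp [pvScanDesc, pvMagicDesc, pvBisect, pvKeys, pvVers, (show ¬ m ≥ 62211 by omega), (show ¬ m ≥ 62161 by omega), (show ¬ m ≥ 62131 by omega), (show ¬ m ≥ 62021 by omega), (show ¬ m ≥ 62011 by omega), (show ¬ m ≥ 60717 by omega), (show ¬ m ≥ 60202 by omega), (show ¬ m ≥ 50823 by omega), (show ¬ m ≥ 50428 by omega), (show ¬ m ≥ 20121 by omega), (show ¬ m ≥ 3571 by omega), (show ¬ m ≥ 3550 by omega), (show ¬ m ≥ 3495 by omega), (show ¬ m ≥ 3439 by omega), (show ¬ m ≥ 3425 by omega), (show ¬ m ≥ 3413 by omega), (show ¬ m ≥ 3394 by omega), (show ¬ m ≥ 3379 by omega), (show ¬ m ≥ 3350 by omega), (show ¬ m ≥ 3310 by omega), (show ¬ m ≥ 3230 by omega), (show m ≥ 3180 from h3180), (show m < 3550 by omega), (show m < 3379 by omega), (show m < 3230 by omega), (show ¬ m < 3150 by omega), (show ¬ m < 3180 by omega)]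
  by_cases h3150 : 3150 ≤ m
  · simp [pvScanDesc, pvMagicDesc, pvBisect, pvKeys, pvVers, (show ¬ m ≥ 62211 by omega), (show ¬ m ≥ 62161 by omega), (show ¬ m ≥ 62131 by omega), (show ¬ m ≥ 62021 by omega), (show ¬ m ≥ 62011 by omega), (show ¬ m ≥ 60717 by omega), (show ¬ m ≥ 60202 by omega), (show ¬ m ≥ 50823 by omega), (show ¬ m ≥ 50428 by omega), (show ¬ m ≥ 20121 by omega), (show ¬ m ≥ 3571 by omega), (show ¬ m ≥ 3550 by omega), (show ¬ m ≥ 3495 by omega), (show ¬ m ≥ 3439 by omega), (show ¬ m ≥ 3425 by omega), (show ¬ m ≥ 3413 by omega), (show ¬ m ≥ 3394 by omega), (show ¬ m ≥ 3379 by omega), (show ¬ m ≥ 3350 by omega), (show ¬ m ≥ 3310 by omega), (show ¬ m ≥ 3230 by omega), (show ¬ m ≥ 3180 by omega), (show m ≥ 3150 from h3150), (show m < 3550 by omega), (show m < 3379 by omega), (show m < 3230 by omega), (show ¬ m < 3150 by omega), (show m < 3180 by omega)]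
  by_cases h3000 : 3000 ≤ m
  · simp [pvScanDesc, pvMagicDesc, pvBisect, pvKeys, pvVers, (show ¬ m ≥ 62211 by omega), (show ¬ m ≥ 62161 by omega), (show ¬ m ≥ 62131 by omega), (show ¬ m ≥ 62021 by omega), (show ¬ m ≥ 62011 by omega), (show ¬ m ≥ 60717 by omega), (show ¬ m ≥ 60202 by omega), (show ¬ m ≥ 50823 by omega), (show ¬ m ≥ 50428 by omega), (show ¬ m ≥ 20121 by omega), (show ¬ m ≥ 3571 by omega), (show ¬ m ≥ 3550 by omega), (show ¬ m ≥ 3495 by omega), (show ¬ m ≥ 3439 by omega), (show ¬ m ≥ 3425 by omega), (show ¬ m ≥ 3413 by omega), (show ¬ m ≥ 3394 by omega), (show ¬ m ≥ 3379 by omega), (show ¬ m ≥ 3350 by omega), (show ¬ m ≥ 3310 by omega), (show ¬ m ≥ 3230 by omega), (show ¬ m ≥ 3180 by omega), (show ¬ m ≥ 3150 by omega), (show m ≥ 3000 from h3000), (show m < 3550 by omega), (show m < 3379 by omega), (show m < 3230 by omega), (show m < 3150 by omega), (show ¬ m < 3000 by omega)]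
  · simp [pvScanDesc, pvMagicDesc, pvBisect, pvKeys, (show ¬ m ≥ 62211 by omega), (show ¬ m ≥ 62161 by omega), (show ¬ m ≥ 62131 by omega), (show ¬ m ≥ 62021 by omega), (show ¬ m ≥ 62011 by omega), (show ¬ m ≥ 60717 by omega), (show ¬ m ≥ 60202 by omega), (show ¬ m ≥ 50823 by omega), (show ¬ m ≥ 50428 by omega), (show ¬ m ≥ 20121 by omega), (show ¬ m ≥ 3571 by omega), (show ¬ m ≥ 3550 by omega), (show ¬ m ≥ 3495 by omega), (show ¬ m ≥ 3439 by omega), (show ¬ m ≥ 3425 by omega), (show ¬ m ≥ 3413 by omega), (show ¬ m ≥ 3394 by omega), (show ¬ m ≥ 3379 by omega), (show ¬ m ≥ 3350 by omega), (show ¬ m ≥ 3310 by omega), (show ¬ m ≥ 3230 by omega), (show ¬ m ≥ 3180 by omega), (show ¬ m ≥ 3150 by omega), (show ¬ m ≥ 3000 by omega), (show m < 3550 by omega), (show m < 3379 by omega), (show m < 3230 by omega), (show m < 3150 by omega), (show m < 3000 by omega)]
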